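-- pv_equiv track=rewrite | github.com/virtualmo/netskope-sdwan-py-sdk | src/netskopesdwan/transport.py | _extract_filename
-- ===== SOURCE A (Python) =====
-- def _extract_filename(content_disposition: str | None) -> str | None:
--     if not content_disposition:
--         return None
--     parts = [part.strip() for part in content_disposition.split(";")]
--     for part in parts:
--         if not part.lower().startswith("filename="):
--             continue
--         value = part.split("=", 1)[1].strip()
--         if len(value) >= 2 and value[0] == value[-1] == '"':
--             value = value[1:-1]
--         return value or None
--     return None
-- ===== SOURCE B (Python) =====
-- def _extract_filename(content_disposition):
--     if not content_disposition:
--         return None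
--     rest = content_disposition
--     while True:
--         k = rest.find(";")
--         part = (rest if k == -1 else rest[:k]).strip()
--         if part[:9].lower() == "filename=":
--             value = part[9:].strip()
--             if len(value) >= 2 and value[0] == value[-1] == '"':
--                 value = value[1:-1]
--             return value or None
--         if k == -1:
--             return None
--         rest = rest[k + 1:]
-- ===== Notes on version B (the rewrite author's own statement) =====
-- stated objective: alternative
-- what changed: A splits the whole header on semicolons into a list of stripped parts and scans that list with lower()/startswith and a bounded split; B never builds the list: it walks the header with an incremental semicolon-find loop, slicing off one part at a time and comparing a 9-character lowered prefix slice, taking the value as the stripped tail of the matching part.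
import Mathlib
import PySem

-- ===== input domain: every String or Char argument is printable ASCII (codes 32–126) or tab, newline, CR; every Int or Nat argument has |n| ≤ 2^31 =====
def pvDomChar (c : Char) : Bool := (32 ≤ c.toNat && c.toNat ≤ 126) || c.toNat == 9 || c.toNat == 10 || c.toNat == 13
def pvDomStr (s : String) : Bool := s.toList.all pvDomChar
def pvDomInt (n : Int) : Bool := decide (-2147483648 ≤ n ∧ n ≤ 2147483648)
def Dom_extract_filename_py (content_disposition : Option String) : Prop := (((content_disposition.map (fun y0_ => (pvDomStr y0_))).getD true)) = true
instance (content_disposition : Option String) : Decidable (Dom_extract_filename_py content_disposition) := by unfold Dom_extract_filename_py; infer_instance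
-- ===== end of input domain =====

-- B replaces A's build-all-parts comprehension + for-loop (split, strip each part,
-- lower-then-startswith, split("=",1)) by a single incremental find(";") loop that
-- slices one part at a time and compares a 9-character prefix slice; objective: alternative.

-- ===== PORT A =====
-- for part in parts: … (parts already stripped)
def pvA_loop : List (List Char) → Option (List Char)
  | [] => none
  | part :: restParts =>
    if ¬ (PySem.Chars.startswith (PySem.Chars.lower part) "filename=".toList) then
      pvA_loop restParts
    else
      -- part.split("=", 1)[1] : index 1 exists because part starts (case-insensitively) with "filename="
      let value := PySem.Chars.strip (PySem.List.pyGetD (PySem.Chars.splitOnMax part ['='] 1) 1 [])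
      let value := if 2 ≤ value.length ∧ PySem.List.pyGet? value 0 = some '"' ∧ PySem.List.pyGet? value (-1) = some '"'
        then PySem.List.slice value (some 1) (some (-1)) else value
      if value = [] then none else some value

def extract_filename_py (content_disposition : Option String) : Option String :=
  match content_disposition with
  | none => none
  | some s =>
    if s.toList = [] then none   -- "if not content_disposition"
    else (pvA_loop ((PySem.Chars.splitOn s.toList [';']).map PySem.Chars.strip)).map String.ofList

-- ===== PORT B =====
-- while True: k = rest.find(";"); part = (rest if k == -1 else rest[:k]).strip(); …
def pvB_loop (cs : List Char) : Option (List Char) :=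
  let k := PySem.Chars.find cs [';']
  let part := PySem.Chars.strip (if k = -1 then cs else PySem.List.slice cs none (some k))
  if PySem.Chars.lower (PySem.List.slice part none (some 9)) = "filename=".toList then
    let value := PySem.Chars.strip (PySem.List.slice part (some 9) none)
    let value := if 2 ≤ value.length ∧ PySem.List.pyGet? value 0 = some '"' ∧ PySem.List.pyGet? value (-1) = some '"'
      then PySem.List.slice value (some 1) (some (-1)) else value
    if value = [] then none else some value
  else if hk : k = -1 then none
  else pvB_loop (PySem.List.slice cs (some (k + 1)) none)
termination_by cs.length
decreasing_by
  · have h1 : -1 ≤ PySem.Chars.find cs [';'] := PySem.Chars.neg_one_le_find cs [';']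
    have h0 : 0 ≤ PySem.Chars.find cs [';'] := by
      simp only [k] at hk; omega
    have hin : [';'] <:+: cs := by
      rw [← PySem.Chars.find_nonneg_iff]; exact h0
    have hne : cs ≠ [] := by
      intro h; rw [h] at hin
      simpa using List.eq_nil_of_infix_nil hin
    rw [PySem.List.slice_from cs (by omega : (0:Int) ≤ k + 1)]
    simp only [List.length_drop]
    have : 0 < cs.length := List.length_pos_iff.mpr hne
    omega

def extract_filename_py_alt (content_disposition : Option String) : Option String :=
  match content_disposition with
  | none => none
  | some s =>
    if s.toList = [] then none
    else (pvB_loop s.toList).map String.ofList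

-- ===== PRECONDITION & SPEC =====
def Spec_extract_filename_py (content_disposition : Option String) (out : Option String) : Prop := out = extract_filename_py_alt content_disposition
instance (content_disposition : Option String) (out : Option String) : Decidable (Spec_extract_filename_py content_disposition out) := by unfold Spec_extract_filename_py; infer_instance

-- ===== CLAIM (what is proved, stated in full; the proofs are below) =====
def Claim_equal_extract_filename_py : Prop := ∀ (content_disposition : Option String), Dom_extract_filename_py content_disposition → Spec_extract_filename_py content_disposition (extract_filename_py content_disposition)

-- ===== LEMMAS AND PROOFS =====

theorem pv_lowerChar_eq_iff (c : Char) : PySem.Chars.lowerChar c = '=' ↔ c = '=' := by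
  unfold PySem.Chars.lowerChar PySem.Chars.isupper
  split
  · rename_i h
    have hb : 65 ≤ c.toNat ∧ c.toNat ≤ 90 := by
      simp only [Bool.and_eq_true, decide_eq_true_eq, Char.le_def] at h
      exact h
    constructor
    · intro he
      exfalso
      have h1 : (Char.ofNat (c.toNat + 32)).toNat = ('=').toNat := by rw [he]
      rw [Char.toNat_ofNat] at h1
      have hv : (c.toNat + 32).isValidChar := Or.inl (by omega)
      rw [if_pos hv] at h1
      have : ('=').toNat = 61 := rfl
      omega
    · intro he
      exfalso
      subst he
      simp [Char.toNat] at hb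
  · simp

theorem pv_gM0 (fuel : Nat) (l cur : List Char) (accL : List (List Char)) :
    PySem.Chars.splitOnMax.go ['='] fuel 0 l cur accL = accL.reverse ++ [cur.reverse ++ l] := by
  cases fuel with
  | zero => simp [PySem.Chars.splitOnMax.go]
  | succ f => cases l with
    | nil => simp [PySem.Chars.splitOnMax.go]
    | cons c rest => simp [PySem.Chars.splitOnMax.go]

theorem pv_gM1 (a : List Char) : ∀ (fuel : Nat) (b cur : List Char) (accL : List (List Char)),
    (a ++ '=' :: b).length < fuel → '=' ∉ a →
    PySem.Chars.splitOnMax.go ['='] fuel 1 (a ++ '=' :: b) cur accL = accL.reverse ++ [cur.reverse ++ a, b] := by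
  induction a with
  | nil =>
    intro fuel b cur accL hf _
    match fuel, hf with
    | f + 1, _ =>
      simp [PySem.Chars.splitOnMax.go, List.isPrefixOf]
      rw [pv_gM0]
      simp
  | cons c a ih =>
    intro fuel b cur accL hf hm
    match fuel, hf with
    | f + 1, hf =>
      have hc : c ≠ '=' := fun h => hm (h ▸ List.mem_cons_self)
      simp only [List.cons_append, PySem.Chars.splitOnMax.go, List.isPrefixOf]
      rw [if_neg (by omega), if_neg (by simp; exact fun h => hc h.symm)]
      rw [ih f b (c :: cur) accL (by simpa using Nat.lt_of_succ_lt_succ hf) (fun h => hm (List.mem_cons_of_mem _ h))]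
      simp

theorem pv_splitOnMax_first (a b : List Char) (h : '=' ∉ a) :
    PySem.Chars.splitOnMax (a ++ '=' :: b) ['='] 1 = [a, b] := by
  unfold PySem.Chars.splitOnMax
  rw [if_neg (by omega)]
  have h1 : Int.toNat 1 = 1 := rfl
  rw [h1, pv_gM1 a _ b [] [] (by simp) h]
  simp

theorem pv_gS_acc (fuel : Nat) : ∀ (l cur : List Char) (accL : List (List Char)),
    PySem.Chars.splitOn.go [';'] fuel l cur accL = accL.reverse ++ PySem.Chars.splitOn.go [';'] fuel l cur [] := by
  induction fuel with
  | zero => intro l cur accL; simp [PySem.Chars.splitOn.go]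
  | succ f ih =>
    intro l cur accL
    cases l with
    | nil => simp [PySem.Chars.splitOn.go]
    | cons c rest =>
      simp only [PySem.Chars.splitOn.go]
      split
      · rw [ih _ _ (cur.reverse :: accL), ih _ _ [cur.reverse]]
        simp
      · exact ih _ _ _

theorem pv_gS_fuel : ∀ (n f1 f2 : Nat) (l cur : List Char) (accL : List (List Char)),
    l.length ≤ n → l.length < f1 → l.length < f2 →
    PySem.Chars.splitOn.go [';'] f1 l cur accL = PySem.Chars.splitOn.go [';'] f2 l cur accL := by
  intro n
  induction n with
  | zero =>
    intro f1 f2 l cur accL h0 h1 h2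
    match l, h0 with
    | [], _ =>
      match f1, f2, h1, h2 with
      | g1+1, g2+1, _, _ => simp [PySem.Chars.splitOn.go]
  | succ m ih =>
    intro f1 f2 l cur accL h0 h1 h2
    match f1, f2, h1, h2 with
    | g1+1, g2+1, h1, h2 =>
      cases l with
      | nil => simp [PySem.Chars.splitOn.go]
      | cons c rest =>
        simp only [PySem.Chars.splitOn.go]
        simp only [List.length_cons] at h0 h1 h2
        split
        · rename_i hp
          have hlen : rest.length ≤ m := by omega
          exact ih g1 g2 rest [] (cur.reverse :: accL) (by simpa using hlen) (by omega) (by omega)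
        · exact ih g1 g2 rest (c :: cur) accL (by omega) (by omega) (by omega)

theorem pv_gS_no (l : List Char) : ∀ (fuel : Nat) (cur : List Char) (accL : List (List Char)),
    l.length < fuel → ';' ∉ l →
    PySem.Chars.splitOn.go [';'] fuel l cur accL = accL.reverse ++ [cur.reverse ++ l] := by
  induction l with
  | nil =>
    intro fuel cur accL hf _
    match fuel, hf with
    | f + 1, _ => simp [PySem.Chars.splitOn.go]
  | cons c rest ih =>
    intro fuel cur accL hf hm
    match fuel, hf with
    | f + 1, hf =>
      have hc : c ≠ ';' := fun h => hm (h ▸ List.mem_cons_self)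
      simp only [PySem.Chars.splitOn.go]
      rw [if_neg (by simp; exact fun h => hc h.symm)]
      rw [ih f (c :: cur) accL (by simpa using Nat.lt_of_succ_lt_succ hf) (fun h => hm (List.mem_cons_of_mem _ h))]
      simp

theorem pv_gS_sep (a : List Char) : ∀ (fuel : Nat) (b cur : List Char) (accL : List (List Char)),
    (a ++ ';' :: b).length < fuel → ';' ∉ a →
    PySem.Chars.splitOn.go [';'] fuel (a ++ ';' :: b) cur accL
      = PySem.Chars.splitOn.go [';'] (fuel - (a.length + 1)) b [] ((cur.reverse ++ a) :: accL) := by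
  induction a with
  | nil =>
    intro fuel b cur accL hf _
    match fuel, hf with
    | f + 1, _ =>
      simp [PySem.Chars.splitOn.go, List.isPrefixOf]
  | cons c a ih =>
    intro fuel b cur accL hf hm
    match fuel, hf with
    | f + 1, hf =>
      have hc : c ≠ ';' := fun h => hm (h ▸ List.mem_cons_self)
      simp only [List.cons_append, PySem.Chars.splitOn.go]
      rw [if_neg (by simp; exact fun h => hc h.symm)]
      rw [ih f b (c :: cur) accL (by simpa using Nat.lt_of_succ_lt_succ hf) (fun h => hm (List.mem_cons_of_mem _ h))]
      have hl : f + 1 - ((c :: a).length + 1) = f - (a.length + 1) := by simp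
      rw [hl]
      simp

theorem pv_splitOn_no (cs : List Char) (h : ';' ∉ cs) :
    PySem.Chars.splitOn cs [';'] = [cs] := by
  unfold PySem.Chars.splitOn
  rw [pv_gS_no cs (cs.length + 1) [] [] (by omega) h]
  simp

theorem pv_splitOn_cons (a b : List Char) (h : ';' ∉ a) :
    PySem.Chars.splitOn (a ++ ';' :: b) [';'] = a :: PySem.Chars.splitOn b [';'] := by
  unfold PySem.Chars.splitOn
  rw [pv_gS_sep a _ b [] [] (by omega) h]
  rw [pv_gS_acc]
  rw [pv_gS_fuel b.length ((a ++ ';' :: b).length + 1 - (a.length + 1)) (b.length + 1) b [] []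
    (le_refl _) (by simp) (by omega)]
  simp

theorem pv_cond_eq (p : List Char) :
    (PySem.Chars.lower (PySem.List.slice p none (some 9)) = "filename=".toList)
      ↔ (PySem.Chars.startswith (PySem.Chars.lower p) "filename=".toList = true) := by
  rw [PySem.Chars.startswith_iff, PySem.List.slice_to p (by omega : (0:Int) ≤ 9), List.prefix_iff_eq_take]
  have hl : ("filename=".toList).length = 9 := by decide
  rw [hl]
  simp only [PySem.Chars.lower, List.map_take]
  have ht : (9 : Int).toNat = 9 := rfl
  rw [ht]
  constructor
  · intro h; exact h.symm
  · intro h; exact h.symm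

theorem pv_decomp (p : List Char)
    (h : PySem.Chars.startswith (PySem.Chars.lower p) "filename=".toList = true) :
    p = p.take 8 ++ '=' :: p.drop 9 ∧ '=' ∉ p.take 8 := by
  rw [PySem.Chars.startswith_iff, List.prefix_iff_eq_take] at h
  have hl : ("filename=".toList).length = 9 := by decide
  rw [hl] at h
  simp only [PySem.Chars.lower] at h
  -- h : "filename=".toList = ((p.map lowerChar).take 9)
  have hplen : 9 ≤ p.length := by
    have := congrArg List.length h
    simp at this
    omega
  have hpt : ∀ i, i < 9 → ∀ (hip : i < p.length),
      (("filename=".toList)[i]?).getD ' ' = PySem.Chars.lowerChar (p[i]'hip) := by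
    intro i hi hip
    have h' : ("filename=".toList)[i]? = some (PySem.Chars.lowerChar (p[i]'hip)) := by
      rw [h, List.getElem?_take_of_lt hi, List.getElem?_map,
        List.getElem?_eq_getElem hip]
      rfl
    rw [h']
    rfl
  have h8 : p[8]'(by omega) = '=' := by
    have := hpt 8 (by omega) (by omega)
    have hv : (("filename=".toList)[8]?).getD ' ' = '=' := by decide
    rw [hv] at this
    exact (pv_lowerChar_eq_iff _).mp this.symm
  constructor
  · conv_lhs => rw [← List.take_append_drop 9 p]
    have : p.take 9 = p.take 8 ++ [p[8]'(by omega)] := by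
      rw [List.take_add_one]
      rw [List.getElem?_eq_getElem (by omega)]
      rfl
    rw [this, h8]
    simp
  · intro hm
    obtain ⟨i, hi, hig⟩ := List.getElem_of_mem hm
    have hi8 : i < 8 := by
      have h2 := hi
      simp only [List.length_take] at h2
      omega
    have hpi : p[i]'(by omega) = '=' := by
      rw [← hig]; simp [List.getElem_take]
    have := hpt i (by omega) (by omega)
    rw [hpi, (pv_lowerChar_eq_iff '=').mpr rfl] at this
    have hne : ∀ j, j < 8 → (("filename=".toList)[j]?).getD ' ' ≠ '=' := by
      intro j hj
      interval_cases j <;> decide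
    exact hne i hi8 this

theorem pv_value_eq (p : List Char)
    (h : PySem.Chars.startswith (PySem.Chars.lower p) "filename=".toList = true) :
    PySem.List.pyGetD (PySem.Chars.splitOnMax p ['='] 1) 1 [] = PySem.List.slice p (some 9) none := by
  obtain ⟨hdec, hnm⟩ := pv_decomp p h
  rw [PySem.List.slice_from p (by omega : (0:Int) ≤ 9)]
  conv_lhs => rw [hdec]
  rw [pv_splitOnMax_first _ _ hnm]
  simp [PySem.List.pyGetD, PySem.List.pyIdx?, PySem.List.pyGet?]

theorem pv_find_neg (cs : List Char) (h : PySem.Chars.find cs [';'] = -1) : ';' ∉ cs := by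
  rw [PySem.Chars.find_eq_neg_one_iff] at h
  rw [← List.singleton_infix_iff]
  exact h

theorem pv_find_pos (cs : List Char) (h : ¬ PySem.Chars.find cs [';'] = -1) :
    cs = cs.take (PySem.Chars.find cs [';']).toNat ++ ';' :: cs.drop ((PySem.Chars.find cs [';']).toNat + 1)
      ∧ ';' ∉ cs.take (PySem.Chars.find cs [';']).toNat := by
  have h0 : 0 ≤ PySem.Chars.find cs [';'] := by
    have := PySem.Chars.neg_one_le_find cs [';']
    omega
  obtain ⟨hpre, hmin⟩ := PySem.Chars.find_spec h0
  set k := (PySem.Chars.find cs [';']).toNat with hk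
  have hklen : k < cs.length := by
    by_contra hge
    rw [List.drop_eq_nil_of_le (by omega)] at hpre
    simpa using List.eq_nil_of_prefix_nil hpre
  have hdk : cs.drop k = cs[k] :: cs.drop (k + 1) := List.drop_eq_getElem_cons hklen
  have hck : cs[k] = ';' := by
    obtain ⟨t, ht⟩ := hpre
    rw [hdk] at ht
    simp only [List.singleton_append, List.cons.injEq] at ht
    exact ht.1.symm
  constructor
  · conv_lhs => rw [← List.take_append_drop k cs]
    rw [hdk, hck]
  · intro hm
    obtain ⟨i, hi, hig⟩ := List.getElem_of_mem hm
    have hik : i < k := by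
      simp only [List.length_take] at hi
      omega
    apply hmin i hik
    rw [List.drop_eq_getElem_cons (by omega)]
    refine ⟨cs.drop (i + 1), ?_⟩
    simp only [List.singleton_append, List.cons.injEq]
    constructor
    · rw [← hig]; simp [List.getElem_take]
    · trivial

-- main loop equivalence
theorem pv_main_aux : ∀ (n : Nat), ∀ (cs : List Char), cs.length = n →
    pvB_loop cs = pvA_loop ((PySem.Chars.splitOn cs [';']).map PySem.Chars.strip) := by
  intro n
  induction n using Nat.strong_induction_on with
  | _ n ih =>
    intro cs hlen
    rw [pvB_loop]
    by_cases hk : PySem.Chars.find cs [';'] = -1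
    · rw [pv_splitOn_no cs (pv_find_neg cs hk)]
      simp only [hk, List.map_cons, List.map_nil, pvA_loop, reduceIte]
      by_cases hc : PySem.Chars.startswith (PySem.Chars.lower (PySem.Chars.strip cs)) "filename=".toList = true
      · rw [← pv_value_eq _ hc, if_pos ((pv_cond_eq _).mpr hc), if_neg (not_not_intro hc)]
      · rw [if_neg (fun h => hc ((pv_cond_eq _).mp h)), if_pos hc]
        simp
    · have h0 : 0 ≤ PySem.Chars.find cs [';'] := by
        have := PySem.Chars.neg_one_le_find cs [';']
        omega
      obtain ⟨hdec, hnm⟩ := pv_find_pos cs hk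
      have hne : cs ≠ [] := by
        intro h
        rw [h] at hk
        exact hk rfl
      have hpos : 0 < cs.length := List.length_pos_iff.mpr hne
      have hsplit : PySem.Chars.splitOn cs [';']
          = cs.take (PySem.Chars.find cs [';']).toNat
            :: PySem.Chars.splitOn (cs.drop ((PySem.Chars.find cs [';']).toNat + 1)) [';'] := by
        conv_lhs => rw [hdec]
        exact pv_splitOn_cons _ _ hnm
      rw [hsplit]
      simp only [List.map_cons, pvA_loop]
      have hpart : PySem.List.slice cs none (some (PySem.Chars.find cs [';'])) = cs.take (PySem.Chars.find cs [';']).toNat :=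
        PySem.List.slice_to cs h0
      rw [if_neg hk, hpart]
      by_cases hc : PySem.Chars.startswith (PySem.Chars.lower (PySem.Chars.strip (cs.take (PySem.Chars.find cs [';']).toNat))) "filename=".toList = true
      · rw [← pv_value_eq _ hc, if_pos ((pv_cond_eq _).mpr hc), if_neg (not_not_intro hc)]
      · rw [if_neg (fun h => hc ((pv_cond_eq _).mp h)), if_pos hc]
        rw [dif_neg hk]
        have hslice : PySem.List.slice cs (some (PySem.Chars.find cs [';'] + 1)) none
            = cs.drop ((PySem.Chars.find cs [';']).toNat + 1) := by
          rw [PySem.List.slice_from cs (by omega : (0:Int) ≤ PySem.Chars.find cs [';'] + 1)]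
          congr 1
          omega
        rw [hslice]
        exact ih (cs.drop ((PySem.Chars.find cs [';']).toNat + 1)).length
          (by simp only [List.length_drop]; omega) _ rfl

theorem pv_main (cs : List Char) :
    pvB_loop cs = pvA_loop ((PySem.Chars.splitOn cs [';']).map PySem.Chars.strip) :=
  pv_main_aux cs.length cs rfl

-- ===== VERDICT (by name: the statement is the Claim_ definition above) =====
theorem extract_filename_py_spec : Claim_equal_extract_filename_py := by
  intro cd _
  unfold Spec_extract_filename_py
  match cd with
  | none => rfl
  | some s =>
    simp only [extract_filename_py, extract_filename_py_alt]
    split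
    · rfl
    · rw [pv_main]
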